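-- pv_equiv track=rewrite | github.com/kadirhanpolat/pytop | src/pytop/separation.py | _separate_closed_sets
-- ===== SOURCE A (Python) =====
-- from typing import Any
--
-- def _separate_closed_sets(opens: list[set[Any]], first: set[Any], second: set[Any]) -> bool:
--     for first_neighborhood in opens:
--         if not first <= first_neighborhood:
--             continue
--         for second_neighborhood in opens:
--             if second <= second_neighborhood and first_neighborhood.isdisjoint(second_neighborhood):
--                 return True
--     return False
-- ===== SOURCE B (Python) =====
-- from typing import Any
--
-- def _separate_closed_sets(opens: list[set[Any]], first: set[Any], second: set[Any]) -> bool: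
--     # Single streaming pass: keep the first-/second-candidates seen so far and
--     # test each incoming set only against the already-seen opposite family, so
--     # each unordered occurrence pair is examined exactly once.
--     firsts: list[set[Any]] = []
--     seconds: list[set[Any]] = []
--     for o in opens:
--         f = first <= o
--         s = second <= o
--         if s:
--             seconds.append(o)
--         if f and any(o.isdisjoint(b) for b in seconds):
--             return True
--         if s and any(a.isdisjoint(o) for a in firsts):
--             return True
--         if f:
--             firsts.append(o)
--     return False
-- ===== Notes on version B (the rewrite author's own statement) =====
-- stated objective: alternative
-- what changed: B is a single streaming pass that maintains the first-/second-candidate families seen so far and tests each incoming set only against the previously accumulated opposite family (each pair examined once, when its later element arrives), instead of A's nested loops that rescan all of opens from scratch for every qualifying outer set.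
import Mathlib
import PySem

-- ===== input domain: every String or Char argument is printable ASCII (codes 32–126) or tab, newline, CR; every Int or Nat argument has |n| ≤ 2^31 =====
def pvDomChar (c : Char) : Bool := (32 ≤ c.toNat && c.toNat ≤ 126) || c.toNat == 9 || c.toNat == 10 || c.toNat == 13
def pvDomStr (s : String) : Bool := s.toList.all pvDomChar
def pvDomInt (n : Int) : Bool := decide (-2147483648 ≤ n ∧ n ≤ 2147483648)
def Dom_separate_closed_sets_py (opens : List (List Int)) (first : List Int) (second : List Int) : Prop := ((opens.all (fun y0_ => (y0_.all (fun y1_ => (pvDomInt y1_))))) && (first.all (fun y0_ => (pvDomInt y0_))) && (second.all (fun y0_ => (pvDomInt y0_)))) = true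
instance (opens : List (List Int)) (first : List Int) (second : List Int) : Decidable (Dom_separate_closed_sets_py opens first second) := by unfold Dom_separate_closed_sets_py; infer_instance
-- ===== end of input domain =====

-- B replaces A's nested rescans by a single streaming pass that accumulates the two
-- candidate families and tests each incoming set against the opposite family seen so far
-- (objective: alternative algorithm of the same cost).

-- ===== PORT A =====
-- inner 'for second_neighborhood in opens' loop of A, with the current first_neighborhood fixed
def sepA_inner (rest : List (List Int)) (second : List Int) (fn : List Int) : Bool :=
  match rest with
  | [] => false
  | o :: tl =>
      if PySem.Set.issubset second o && PySem.Set.isdisjoint fn o then true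
      else sepA_inner tl second fn

-- outer 'for first_neighborhood in opens' loop of A (opens stays the full list for the inner loop)
def sepA_outer (l : List (List Int)) (opens : List (List Int)) (first : List Int) (second : List Int) : Bool :=
  match l with
  | [] => false
  | o :: tl =>
      if ¬ (PySem.Set.issubset first o = true) then sepA_outer tl opens first second
      else if sepA_inner opens second o then true
      else sepA_outer tl opens first second

def separate_closed_sets_py (opens : List (List Int)) (first : List Int) (second : List Int) : Bool :=
  sepA_outer opens opens first second

-- ===== PORT B =====
-- streaming loop of Source B: fs/ss are the first-/second-candidate families seen so far
def sepB_loop (l : List (List Int)) (fs ss : List (List Int)) (first second : List Int) : Bool :=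
  match l with
  | [] => false
  | o :: tl =>
      let f := PySem.Set.issubset first o
      let s := PySem.Set.issubset second o
      let ss' := if s then ss ++ [o] else ss
      if f && ss'.any (fun b => PySem.Set.isdisjoint o b) then true
      else if s && fs.any (fun a => PySem.Set.isdisjoint a o) then true
      else sepB_loop tl (if f then fs ++ [o] else fs) ss' first second

def separate_closed_sets_py_alt (opens : List (List Int)) (first : List Int) (second : List Int) : Bool :=
  sepB_loop opens [] [] first second

-- ===== PRECONDITION & SPEC =====
def Spec_separate_closed_sets_py (opens : List (List Int)) (first : List Int) (second : List Int) (out : Bool) : Prop := out = separate_closed_sets_py_alt opens first second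
instance (opens : List (List Int)) (first : List Int) (second : List Int) (out : Bool) : Decidable (Spec_separate_closed_sets_py opens first second out) := by unfold Spec_separate_closed_sets_py; infer_instance

-- ===== CLAIM (what is proved, stated in full; the proofs are below) =====
def Claim_equal_separate_closed_sets_py : Prop := ∀ (opens : List (List Int)) (first : List Int) (second : List Int), Dom_separate_closed_sets_py opens first second → Spec_separate_closed_sets_py opens first second (separate_closed_sets_py opens first second)

-- ===== LEMMAS AND PROOFS =====
-- canonical "some qualifying pair is disjoint" formula both ports are reduced to
def sepPairs (F S : List (List Int)) : Bool :=
  F.any (fun a => S.any (fun b => PySem.Set.isdisjoint a b))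

theorem sepA_inner_eq_any (rest : List (List Int)) (second fn : List Int) :
    sepA_inner rest second fn
      = rest.any (fun b => PySem.Set.issubset second b && PySem.Set.isdisjoint fn b) := by
  induction rest with
  | nil => rfl
  | cons o tl ih =>
      simp only [sepA_inner, List.any_cons]
      split_ifs with h
      · simp [h]
      · simp only [eq_false_of_ne_true h, Bool.false_or, ih]

theorem sepA_outer_eq_any (l opens : List (List Int)) (first second : List Int) :
    sepA_outer l opens first second
      = l.any (fun a => PySem.Set.issubset first a && sepA_inner opens second a) := by
  induction l with
  | nil => rfl
  | cons o tl ih =>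
      simp only [sepA_outer, List.any_cons]
      split_ifs with h1 h2
      · simp only [h1, h2, Bool.true_and, Bool.true_or]
      · rw [Bool.not_eq_true] at h2
        simp only [h1, h2, Bool.and_false, Bool.false_or, ih]
      · rw [Bool.not_eq_true] at h1
        simp only [h1, Bool.false_and, Bool.false_or, ih]

theorem any_filter_any (l : List (List Int)) (p q : List Int → Bool) :
    (l.filter p).any q = l.any (fun x => p x && q x) := by
  induction l with
  | nil => rfl
  | cons o tl ih =>
      by_cases h : p o = true <;> simp [h, ih]

theorem sepA_eq_pairs (opens : List (List Int)) (first second : List Int) :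
    separate_closed_sets_py opens first second
      = sepPairs (opens.filter (fun o => PySem.Set.issubset first o))
                 (opens.filter (fun o => PySem.Set.issubset second o)) := by
  unfold separate_closed_sets_py sepPairs
  rw [sepA_outer_eq_any, any_filter_any]
  apply congrArg (List.any opens)
  funext a
  rw [sepA_inner_eq_any, any_filter_any]

theorem list_any_or (l : List (List Int)) (p q : List Int → Bool) :
    (l.any fun x => p x || q x) = (l.any p || l.any q) := by
  induction l with
  | nil => rfl
  | cons a tl ih =>
      simp only [List.any_cons, ih]
      cases p a <;> cases q a <;> cases tl.any p <;> cases tl.any q <;> rfl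

theorem sepPairs_append_right (F S T : List (List Int)) :
    sepPairs F (S ++ T) = (sepPairs F S || sepPairs F T) := by
  unfold sepPairs
  rw [show (fun a => (S ++ T).any fun b => PySem.Set.isdisjoint a b)
        = (fun a => (S.any fun b => PySem.Set.isdisjoint a b)
            || (T.any fun b => PySem.Set.isdisjoint a b)) from
      funext fun a => List.any_append]
  exact list_any_or F _ _

theorem sepPairs_append_left (F G S : List (List Int)) :
    sepPairs (F ++ G) S = (sepPairs F S || sepPairs G S) := by
  simp [sepPairs, List.any_append]

theorem sepPairs_single_left (o : List Int) (S : List (List Int)) :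
    sepPairs [o] S = S.any (fun b => PySem.Set.isdisjoint o b) := by
  simp [sepPairs]

theorem sepPairs_single_right (F : List (List Int)) (o : List Int) :
    sepPairs F [o] = F.any (fun a => PySem.Set.isdisjoint a o) := by
  simp [sepPairs]

-- streaming invariant: finishing the loop, together with the pairs already wholly inside
-- the accumulators, covers exactly all qualifying pairs of the full list
theorem sepB_invariant (l : List (List Int)) (fs ss : List (List Int)) (first second : List Int) :
    (sepB_loop l fs ss first second || sepPairs fs ss)
      = sepPairs (fs ++ l.filter (fun o => PySem.Set.issubset first o))
                 (ss ++ l.filter (fun o => PySem.Set.issubset second o)) := by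
  induction l generalizing fs ss with
  | nil => simp [sepB_loop]
  | cons o tl ih =>
      simp only [sepB_loop, List.filter_cons]
      cases hf : PySem.Set.issubset first o <;> cases hs : PySem.Set.issubset second o <;>
        simp only [Bool.false_and, Bool.true_and, Bool.false_eq_true,
          if_false, if_true]
      · -- f = false, s = false
        exact ih fs ss
      · -- f = false, s = true
        rw [show ss ++ o :: List.filter (fun o => PySem.Set.issubset second o) tl
              = (ss ++ [o]) ++ List.filter (fun o => PySem.Set.issubset second o) tl by simp,
            ← ih fs (ss ++ [o]), sepPairs_append_right, sepPairs_single_right]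
        cases fs.any (fun a => PySem.Set.isdisjoint a o) <;>
          cases sepB_loop tl fs (ss ++ [o]) first second <;>
          cases sepPairs fs ss <;> rfl
      · -- f = true, s = false
        rw [show fs ++ o :: List.filter (fun o => PySem.Set.issubset first o) tl
              = (fs ++ [o]) ++ List.filter (fun o => PySem.Set.issubset first o) tl by simp,
            ← ih (fs ++ [o]) ss, sepPairs_append_left, sepPairs_single_left]
        cases ss.any (fun b => PySem.Set.isdisjoint o b) <;>
          cases sepB_loop tl (fs ++ [o]) ss first second <;>
          cases sepPairs fs ss <;> rfl
      · -- f = true, s = true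
        rw [show fs ++ o :: List.filter (fun o => PySem.Set.issubset first o) tl
              = (fs ++ [o]) ++ List.filter (fun o => PySem.Set.issubset first o) tl by simp,
            show ss ++ o :: List.filter (fun o => PySem.Set.issubset second o) tl
              = (ss ++ [o]) ++ List.filter (fun o => PySem.Set.issubset second o) tl by simp,
            ← ih (fs ++ [o]) (ss ++ [o]), sepPairs_append_left, sepPairs_single_left,
            sepPairs_append_right, sepPairs_single_right, List.any_append]
        cases ss.any (fun b => PySem.Set.isdisjoint o b) <;>
          cases [o].any (fun b => PySem.Set.isdisjoint o b) <;>
          cases fs.any (fun a => PySem.Set.isdisjoint a o) <;>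
          cases sepB_loop tl (fs ++ [o]) (ss ++ [o]) first second <;>
          cases sepPairs fs ss <;> rfl

-- ===== VERDICT (by name: the statement is the Claim_ definition above) =====
theorem separate_closed_sets_py_spec : Claim_equal_separate_closed_sets_py := by
  intro opens first second _
  unfold Spec_separate_closed_sets_py separate_closed_sets_py_alt
  have h := sepB_invariant opens [] [] first second
  simp only [List.nil_append] at h
  rw [sepA_eq_pairs, ← h]
  simp [sepPairs]
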